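-- pv_equiv track=rewrite | github.com/mrasz/PythonPit | Hangperson/hangperson.py | getPersonString
-- ===== SOURCE A (Python) =====
-- def getPersonString(wrongGuesses=0):
--     # Generate the hanging person string based on the number of incorrect guesses.
--     # TODO: Should probably move this into the HangpersonGame class for cleanliness
--
--     # 1.    |
--     # 2.    0
--     # 3.   /|\
--     # 4.   / \
--     # 5.
--     resultLines = list()
--
--     # Initialize a counter for the lines
--     numLines = 0
--
--     # Set the total number of lines needed for the presentation
--     maxLines = 5
--
--     # wrongGuesses = 0
--     if wrongGuesses >= 1:
--         resultLines.append('   |   ')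
--         resultLines.append('\n')
--         numLines+=1
--         resultLines.append('   0   ')
--         resultLines.append('\n')
--         numLines+=1
--
--     # wrongGuesses = 2
--     if wrongGuesses >= 2:
--         resultLines.append('  /')
--
--     # wrongGuesses = 3
--     if wrongGuesses >= 3:
--         resultLines.append('|')
--
--     # wrongGuesses = 4
--     if wrongGuesses >= 4:
--         resultLines.append('\  ')
--         resultLines.append('\n')
--         numLines+=1
--
--     # wrongGuesses = 5
--     if wrongGuesses >= 5:
--         resultLines.append('  /')
--
--     # wrongGuesses = 6
--     if wrongGuesses >= 6:
--         resultLines.append(' \  ')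
--         resultLines.append('\n')
--         numLines+=1
--
--     for i in range(numLines, maxLines):
--         resultLines.append('\n')
--
--     return ''.join(resultLines)
-- ===== SOURCE B (Python) =====
-- def getPersonString(wrongGuesses=0):
--     # Build the five display lines positionally, then join them.
--     l0 = '   |   ' if wrongGuesses >= 1 else ''
--     l1 = '   0   ' if wrongGuesses >= 1 else ''
--     l2 = ('  /' if wrongGuesses >= 2 else '') \
--        + ('|' if wrongGuesses >= 3 else '') \
--        + ('\  ' if wrongGuesses >= 4 else '')
--     l3 = ('  /' if wrongGuesses >= 5 else '') \
--        + (' \  ' if wrongGuesses >= 6 else '')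
--     return '\n'.join([l0, l1, l2, l3, '']) + '\n'
-- ===== Notes on version B (the rewrite author's own statement) =====
-- stated objective: simpler
-- what changed: B computes the five display lines positionally and joins them with newlines, eliminating A's chunk-accumulator list, line counter and the range(numLines, maxLines) newline-padding loop.
import Mathlib
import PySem

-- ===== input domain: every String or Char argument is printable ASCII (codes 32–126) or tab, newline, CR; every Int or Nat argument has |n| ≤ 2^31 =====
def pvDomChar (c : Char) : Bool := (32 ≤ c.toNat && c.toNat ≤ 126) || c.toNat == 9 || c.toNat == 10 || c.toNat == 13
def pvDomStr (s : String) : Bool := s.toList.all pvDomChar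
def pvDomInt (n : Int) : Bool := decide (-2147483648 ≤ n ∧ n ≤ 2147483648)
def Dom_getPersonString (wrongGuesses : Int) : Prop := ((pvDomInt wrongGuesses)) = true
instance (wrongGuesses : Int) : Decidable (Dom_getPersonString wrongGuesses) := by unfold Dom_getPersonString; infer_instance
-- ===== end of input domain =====

-- ===== PORT A =====
-- B builds the five display lines positionally and joins them, dropping A's line counter and padding loop (simpler decomposition).
-- Port of A: accumulate chunks in resultLines with a line counter, pad with newlines via range(numLines, maxLines), then join.
def getPersonString (wrongGuesses : Int) : String :=
  let resultLines : List String := []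
  let numLines : Int := 0
  let maxLines : Int := 5
  let (resultLines, numLines) :=
    if wrongGuesses ≥ 1 then
      (resultLines ++ ["   |   ", "\n", "   0   ", "\n"], numLines + 1 + 1)
    else (resultLines, numLines)
  let resultLines := if wrongGuesses ≥ 2 then resultLines ++ ["  /"] else resultLines
  let resultLines := if wrongGuesses ≥ 3 then resultLines ++ ["|"] else resultLines
  let (resultLines, numLines) :=
    if wrongGuesses ≥ 4 then (resultLines ++ ["\\  ", "\n"], numLines + 1)
    else (resultLines, numLines)
  let resultLines := if wrongGuesses ≥ 5 then resultLines ++ ["  /"] else resultLines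
  let (resultLines, numLines) :=
    if wrongGuesses ≥ 6 then (resultLines ++ [" \\  ", "\n"], numLines + 1)
    else (resultLines, numLines)
  let resultLines :=
    (PySem.List.pyRange numLines maxLines 1).foldl (fun acc _ => acc ++ ["\n"]) resultLines
  String.join resultLines

-- ===== PORT B =====
def getPersonString_alt (wrongGuesses : Int) : String :=
  let l0 := if wrongGuesses ≥ 1 then "   |   " else ""
  let l1 := if wrongGuesses ≥ 1 then "   0   " else ""
  let l2 := (if wrongGuesses ≥ 2 then "  /" else "")
          ++ (if wrongGuesses ≥ 3 then "|" else "")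
          ++ (if wrongGuesses ≥ 4 then "\\  " else "")
  let l3 := (if wrongGuesses ≥ 5 then "  /" else "")
          ++ (if wrongGuesses ≥ 6 then " \\  " else "")
  String.intercalate "\n" [l0, l1, l2, l3, ""] ++ "\n"

-- ===== PRECONDITION & SPEC =====
def Spec_getPersonString (wrongGuesses : Int) (out : String) : Prop := out = getPersonString_alt wrongGuesses
instance (wrongGuesses : Int) (out : String) : Decidable (Spec_getPersonString wrongGuesses out) := by unfold Spec_getPersonString; infer_instance

-- ===== CLAIM (what is proved, stated in full; the proofs are below) =====
def Claim_equal_getPersonString : Prop := ∀ (wrongGuesses : Int), Dom_getPersonString wrongGuesses → Spec_getPersonString wrongGuesses (getPersonString wrongGuesses)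

-- ===== LEMMAS AND PROOFS =====

-- ===== VERDICT (by name: the statement is the Claim_ definition above) =====
theorem getPersonString_spec : Claim_equal_getPersonString := by
  intro wg _
  unfold Spec_getPersonString getPersonString getPersonString_alt
  by_cases h6 : wg ≥ 6
  · simp only [h6, show wg ≥ 1 by omega, show wg ≥ 2 by omega, show wg ≥ 3 by omega,
      show wg ≥ 4 by omega, show wg ≥ 5 by omega, if_true, if_pos]
    decide
  · by_cases h5 : wg ≥ 5
    · simp only [h5, if_pos, if_neg h6, show wg ≥ 1 by omega, show wg ≥ 2 by omega,
        show wg ≥ 3 by omega, show wg ≥ 4 by omega, if_true]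
      decide
    · by_cases h4 : wg ≥ 4
      · simp only [h4, if_pos, if_neg h5, if_neg h6, show wg ≥ 1 by omega,
          show wg ≥ 2 by omega, show wg ≥ 3 by omega, if_true]
        decide
      · by_cases h3 : wg ≥ 3
        · simp only [h3, if_pos, if_neg h4, if_neg h5, if_neg h6,
            show wg ≥ 1 by omega, show wg ≥ 2 by omega, if_true]
          decide
        · by_cases h2 : wg ≥ 2
          · simp only [h2, if_pos, if_neg h3, if_neg h4, if_neg h5, if_neg h6,
              show wg ≥ 1 by omega, if_true]
            decide
          · by_cases h1 : wg ≥ 1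
            · simp only [if_pos h1, if_neg h2, if_neg h3, if_neg h4, if_neg h5, if_neg h6]
              decide
            · simp only [if_neg h1, if_neg h2, if_neg h3, if_neg h4, if_neg h5, if_neg h6]
              decide
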